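-- pv_equiv track=rewrite | github.com/yegorkavegetablya/- | Homework/Practice3/labs/lab11.py | bits_into_signed_number
-- ===== SOURCE A (Python) =====
-- def bits_into_signed_number(b):
--     sign = b[0]
--     result = 0
--     for i in range(1, len(b)):
--         result *= 2
--         if sign == 0:
--             result += b[i]
--         else:
--             result += (1 - b[i])
--     result *= (1 if sign == 0 else -1)
--     result -= (0 if sign == 0 else 1)
--     return result
-- ===== SOURCE B (Python) =====
-- def bits_into_signed_number(b):
--     sign = b[0]
--     mag = 0
--     for bit in b[1:]:
--         mag = mag * 2 + bit
--     return mag if sign == 0 else mag - 2 ** (len(b) - 1)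
-- ===== Notes on version B (the rewrite author's own statement) =====
-- stated objective: simpler
-- what changed: B decodes the tail as an unsigned magnitude in one branch-free loop and applies a closed-form two's-complement offset mag - 2**(len(b)-1) when the sign bit is nonzero, replacing A's per-bit inversion and its negate-then-subtract-one post-processing.
import Mathlib
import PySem

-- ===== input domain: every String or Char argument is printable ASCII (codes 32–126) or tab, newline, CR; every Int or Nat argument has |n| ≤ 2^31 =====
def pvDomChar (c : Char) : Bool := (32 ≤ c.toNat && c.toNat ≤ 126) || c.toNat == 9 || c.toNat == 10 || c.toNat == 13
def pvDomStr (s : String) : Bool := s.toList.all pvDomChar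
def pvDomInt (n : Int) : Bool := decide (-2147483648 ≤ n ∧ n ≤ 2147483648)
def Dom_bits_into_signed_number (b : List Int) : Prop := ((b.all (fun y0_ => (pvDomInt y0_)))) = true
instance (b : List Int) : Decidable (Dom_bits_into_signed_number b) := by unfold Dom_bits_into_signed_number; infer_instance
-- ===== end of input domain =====

-- B decodes the tail as an unsigned magnitude and applies a closed-form two's-complement
-- offset when the sign bit is nonzero, replacing A's per-bit inversion and negate/subtract-one (simpler).


-- ===== PORT A =====
-- sign = b[0]; result folds over range(1, len(b)), branching on sign each step;
-- then the negate / subtract-one post-processing. b[0] = none (empty list) is excluded by Pre_.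
def bits_into_signed_number (b : List Int) : Int :=
  match PySem.List.pyGet? b 0 with
  | none => 0  -- IndexError in Python; unreachable under Pre_
  | some sign =>
    let result : Int :=
      (PySem.List.pyRange 1 (PySem.List.len b) 1).foldl
        (fun result i =>
          let result := result * 2
          if sign = 0 then result + PySem.List.pyGetD b i 0
          else result + (1 - PySem.List.pyGetD b i 0)) 0
    let result := result * (if sign = 0 then 1 else -1)
    result - (if sign = 0 then 0 else 1)

-- ===== PORT B =====
-- sign = b[0]; mag = branch-free fold over b[1:]; closed-form offset when sign ≠ 0.
def bits_into_signed_number_alt (b : List Int) : Int :=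
  match PySem.List.pyGet? b 0 with
  | none => 0  -- IndexError in Python; unreachable under Pre_
  | some sign =>
    let mag : Int := (PySem.List.slice b (some 1) none).foldl (fun mag bit => mag * 2 + bit) 0
    if sign = 0 then mag else mag - 2 ^ (b.length - 1)

-- ===== PRECONDITION & SPEC =====
-- Pre_ excludes only the empty list, on which both Pythons raise IndexError at b[0].
def Pre_bits_into_signed_number (b : List Int) : Prop := b ≠ []
instance (b : List Int) : Decidable (Pre_bits_into_signed_number b) := by
  unfold Pre_bits_into_signed_number; infer_instance
def pvWitness_bits_into_signed_number : List Int := [1, 0, 1, 1]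
def Spec_bits_into_signed_number (b : List Int) (out : Int) : Prop := out = bits_into_signed_number_alt b
instance (b : List Int) (out : Int) : Decidable (Spec_bits_into_signed_number b out) := by unfold Spec_bits_into_signed_number; infer_instance

-- ===== CLAIM (what is proved, stated in full; the proofs are below) =====
def Claim_equal_bits_into_signed_number : Prop := ∀ (b : List Int), Dom_bits_into_signed_number b → Pre_bits_into_signed_number b → Spec_bits_into_signed_number b (bits_into_signed_number b)

-- ===== LEMMAS AND PROOFS =====

-- the straight binary fold shifts linearly in its accumulator
theorem pvFold_shift (t : List Int) (a : Int) :
    t.foldl (fun r x => r * 2 + x) a = a * 2 ^ t.length + t.foldl (fun r x => r * 2 + x) 0 := by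
  induction t generalizing a with
  | nil => simp
  | cons x t ih =>
    simp only [List.foldl_cons, List.length_cons]
    rw [ih (a * 2 + x), ih (0 * 2 + x)]
    ring

-- A's inverted-bit fold in terms of B's straight fold
theorem pvFold_inv (t : List Int) (a : Int) :
    t.foldl (fun r x => r * 2 + (1 - x)) a
      = (a + 1) * 2 ^ t.length - 1 - t.foldl (fun r x => r * 2 + x) 0 := by
  induction t generalizing a with
  | nil => simp
  | cons x t ih =>
    simp only [List.foldl_cons, List.length_cons]
    rw [ih (a * 2 + (1 - x)), pvFold_shift t (0 * 2 + x)]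
    ring

theorem bits_spec_aux (s : Int) (t : List Int) :
    bits_into_signed_number (s :: t) = bits_into_signed_number_alt (s :: t) := by
  have hget : PySem.List.pyGet? (s :: t) 0 = some s := by
    simp [PySem.List.pyGet?, PySem.List.pyIdx?]
  have hfold :
      (PySem.List.pyRange 1 (PySem.List.len (s :: t)) 1).foldl
        (fun result i =>
          let result := result * 2
          if s = 0 then result + PySem.List.pyGetD (s :: t) i 0
          else result + (1 - PySem.List.pyGetD (s :: t) i 0)) 0
      = t.foldl (fun r x => if s = 0 then r * 2 + x else r * 2 + (1 - x)) 0 := by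
    have := PySem.List.foldl_pyRange_pyGetD (s :: t) 0
      (fun r x => if s = 0 then r * 2 + x else r * 2 + (1 - x)) 0 (a := 1) (by norm_num)
    simpa using this
  have hslice : PySem.List.slice (s :: t) (some 1) none = t := by
    simp [PySem.List.slice_from_one]
  simp only [bits_into_signed_number, bits_into_signed_number_alt, hget, hfold, hslice]
  by_cases hs : s = 0
  · simp [hs]
  · have hL : (fun (r x : Int) => if s = 0 then r * 2 + x else r * 2 + (1 - x))
        = (fun (r x : Int) => r * 2 + (1 - x)) := by
      funext r x; rw [if_neg hs]
    rw [hL, if_neg hs, if_neg hs, if_neg hs, pvFold_inv t 0]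
    simp only [List.length_cons, Nat.add_sub_cancel]
    ring

-- ===== VERDICT (by name: the statement is the Claim_ definition above) =====
theorem bits_into_signed_number_spec : Claim_equal_bits_into_signed_number := by
  intro b _ hpre
  cases b with
  | nil => exact absurd rfl hpre
  | cons s t => exact bits_spec_aux s t
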